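-- pv_equiv track=rewrite | github.com/Tanushree713/BasicsInPython | PractiseSet.py | pattern5
-- ===== SOURCE A (Python) =====
-- def pattern5(n):
--     pat = ''
--     for i in range(n) :
--         for j in range(n-i-1):
--             pat += " "
--         for j in range(2*i+1):
--             pat += "*"
--         for j in range(n-i-1):
--             pat += " "
--         pat += '\n'
--     return pat
-- ===== SOURCE B (Python) =====
-- def pattern5(n):
--     width = 2 * n - 1
--     return ''.join(('*' * (2 * i + 1)).center(width) + '\n' for i in range(n))
-- ===== Notes on version B (the rewrite author's own statement) =====
-- stated objective: idiomatic
-- what changed: Replaced A's three character-appending inner loops per row with arithmetic row construction: each row is ('*'*(2*i+1)).center(2*n-1), rows joined with newlines.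
import Mathlib
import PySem

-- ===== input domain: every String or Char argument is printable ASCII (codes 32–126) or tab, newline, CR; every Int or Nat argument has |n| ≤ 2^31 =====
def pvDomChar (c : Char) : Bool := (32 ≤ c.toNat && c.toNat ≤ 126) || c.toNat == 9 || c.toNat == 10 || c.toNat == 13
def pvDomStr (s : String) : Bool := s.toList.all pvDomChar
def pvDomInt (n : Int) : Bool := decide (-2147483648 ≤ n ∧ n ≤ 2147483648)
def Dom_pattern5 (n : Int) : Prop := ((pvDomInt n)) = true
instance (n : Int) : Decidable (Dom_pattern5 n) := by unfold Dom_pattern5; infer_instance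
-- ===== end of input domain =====

-- B replaces A's character-by-character nested loops with row arithmetic: each row is
-- ('*'*(2i+1)).center(2n-1) + '\n', joined; same return value, simpler decomposition.

-- ===== PORT A =====
-- A builds the string one character at a time with three inner loops per row.
-- The accumulating string is ported as a List Char, returned via String.ofList (exact:
-- Python str concatenation of single chars = list append of those chars).
def pattern5 (n : Int) : String :=
  String.ofList <|
    (PySem.List.pyRange 0 n 1).foldl (fun pat i =>
      let pat := (PySem.List.pyRange 0 (n - i - 1) 1).foldl (fun p _ => p ++ [' ']) pat
      let pat := (PySem.List.pyRange 0 (2 * i + 1) 1).foldl (fun p _ => p ++ ['*']) pat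
      let pat := (PySem.List.pyRange 0 (n - i - 1) 1).foldl (fun p _ => p ++ [' ']) pat
      pat ++ ['\n']) ([] : List Char)

-- ===== PORT B =====
-- Hand port of CPython's str.center on List Char (exact: marg = width - len;
-- left = marg // 2 + (marg & width & 1); no pad when width <= len).
def pyCenter (s : List Char) (w : Int) : List Char :=
  let marg : Int := w - s.length
  if marg ≤ 0 then s
  else
    let m := marg.toNat
    let left := m / 2 + (m &&& w.toNat &&& 1)
    List.replicate left ' ' ++ s ++ List.replicate (m - left) ' '

-- '*' * k is List.replicate k.toNat '*' (exact: negative repeat count gives '');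
-- ''.join of the rows is list concatenation (flatten).
def pattern5_alt (n : Int) : String :=
  let width := 2 * n - 1
  String.ofList <|
    ((PySem.List.pyRange 0 n 1).map
      (fun i => pyCenter (List.replicate (2 * i + 1).toNat '*') width ++ ['\n'])).flatten

-- ===== PRECONDITION & SPEC =====
def Spec_pattern5 (n : Int) (out : String) : Prop := out = pattern5_alt n
instance (n : Int) (out : String) : Decidable (Spec_pattern5 n out) := by unfold Spec_pattern5; infer_instance

-- ===== CLAIM (what is proved, stated in full; the proofs are below) =====
def Claim_equal_pattern5 : Prop := ∀ (n : Int), Dom_pattern5 n → Spec_pattern5 n (pattern5 n)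

-- ===== LEMMAS AND PROOFS =====

-- the char-append inner loop appends `l.length` copies of c
theorem foldl_append_const {α : Type} (l : List α) (c : Char) (p : List Char) :
    l.foldl (fun p _ => p ++ [c]) p = p ++ List.replicate l.length c := by
  induction l generalizing p with
  | nil => simp
  | cons x xs ih =>
    rw [List.foldl_cons, ih, List.append_assoc]
    simp [List.replicate_succ]

-- the outer row loop concatenates the rows
theorem foldl_append_rows (l : List Int) (row : Int → List Char) (p : List Char) :
    l.foldl (fun pat i => pat ++ row i) p = p ++ (l.map row).flatten := by
  induction l generalizing p with
  | nil => simp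
  | cons x xs ih => simp [List.foldl_cons, ih]

-- low bit of an even number's AND with anything is 0 (CPython's parity correction vanishes)
theorem and_even (k w : Nat) : (2*k &&& w) &&& 1 = 0 := by
  rw [Nat.and_assoc, Nat.and_one_is_mod w]
  rcases Nat.mod_two_eq_zero_or_one w with h | h <;> rw [h] <;>
    simp [Nat.and_one_is_mod, Nat.mul_mod_right]

-- centering 2i+1 stars in width 2n-1 is exactly n-i-1 spaces on each side
theorem row_eq (n i : Int) (h0 : 0 ≤ i) (h1 : i < n) :
    List.replicate (n - i - 1).toNat ' ' ++ List.replicate (2 * i + 1).toNat '*'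
      ++ List.replicate (n - i - 1).toNat ' '
    = pyCenter (List.replicate (2 * i + 1).toNat '*') (2 * n - 1) := by
  unfold pyCenter
  simp only [List.length_replicate]
  by_cases hl : i = n - 1
  · have hz : (2*n - 1 : Int) - ((2*i+1).toNat : Int) ≤ 0 := by omega
    rw [if_pos hz]
    have : (n - i - 1).toNat = 0 := by omega
    simp [this]
  · have hz : ¬ ((2*n - 1 : Int) - ((2*i+1).toNat : Int) ≤ 0) := by omega
    rw [if_neg hz]
    have hm : ((2*n - 1 : Int) - ((2*i+1).toNat : Int)).toNat = 2 * (n - i - 1).toNat := by omega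
    rw [hm, and_even]
    have h2 : 2 * (n - i - 1).toNat / 2 = (n - i - 1).toNat := by omega
    rw [h2]
    simp
    omega

theorem pattern5_spec : Claim_equal_pattern5 := by
  intro n _
  unfold Spec_pattern5 pattern5 pattern5_alt
  simp only [foldl_append_const, PySem.List.length_pyRange_one, Int.sub_zero,
    List.append_assoc]
  rw [foldl_append_rows (PySem.List.pyRange 0 n 1)
    (fun i => List.replicate (n - i - 1).toNat ' ' ++
      (List.replicate (2 * i + 1).toNat '*' ++
        (List.replicate (n - i - 1).toNat ' ' ++ ['\n']))) []]
  simp only [List.nil_append]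
  congr 1
  congr 1
  apply List.map_congr_left
  intro i hi
  rw [PySem.List.mem_pyRange_one] at hi
  simp only [← List.append_assoc]
  rw [row_eq n i hi.1 hi.2]
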